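-- pv_equiv track=rewrite | github.com/urieliram/tc_uc2 | routines.py | time_on_row
-- ===== SOURCE A (Python) =====
-- def time_on_row(row, account):
--     Ton = [0 for x in range(len(row))]
--
--     for t in range(len(Ton)):
--         if row[t] == 1:
--             if  t == 0:
--                 Ton[t] = account + 1
--             else:
--                 Ton[t] = Ton[t-1] + 1
--     return(Ton)
-- ===== SOURCE B (Python) =====
-- def time_on_row(row, account):
--     # Two-stage run-length approach: compress into maximal runs, then expand.
--     runs = []
--     for x in row:
--         if runs and runs[-1][0] == x:
--             runs[-1][1] += 1
--         else:
--             runs.append([x, 1])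
--     out = []
--     leading = True
--     for v, n in runs:
--         if v == 1:
--             base = account if leading else 0
--             out.extend(base + k for k in range(1, n + 1))
--         else:
--             out.extend([0] * n)
--         leading = False
--     return out
-- ===== Notes on version B (the rewrite author's own statement) =====
-- stated objective: alternative
-- what changed: Replaces A's per-index recurrence (rereading Ton[t-1] in a preallocated array) by a two-stage run-length algorithm: compress the row into maximal equal-value runs, then expand each run (the leading 1-run seeded with account, later 1-runs from 0, other runs to zeros).
import Mathlib
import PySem

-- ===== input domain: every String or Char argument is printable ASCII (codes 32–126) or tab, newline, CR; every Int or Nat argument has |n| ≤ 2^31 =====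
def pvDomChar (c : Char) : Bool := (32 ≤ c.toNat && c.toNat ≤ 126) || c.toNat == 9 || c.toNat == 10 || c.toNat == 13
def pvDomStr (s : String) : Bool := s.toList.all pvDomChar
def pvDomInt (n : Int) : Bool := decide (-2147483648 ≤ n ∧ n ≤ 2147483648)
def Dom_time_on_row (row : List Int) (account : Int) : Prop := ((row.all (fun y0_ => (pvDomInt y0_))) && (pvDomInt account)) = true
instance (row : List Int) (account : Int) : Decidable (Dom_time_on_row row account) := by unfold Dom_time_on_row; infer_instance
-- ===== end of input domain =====

-- B replaces A's per-index recurrence (rereading Ton[t-1] in a preallocated array) by a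
-- two-stage run-length algorithm: compress the row into maximal equal-value runs, then
-- expand each run; same values, a genuinely different decomposition (alternative, not faster).

-- ===== PORT A =====
def time_on_row (row : List Int) (account : Int) : List Int :=
  let Ton0 : List Int := (PySem.List.pyRange 0 (row.length : Int) 1).map (fun _ => 0)
  (PySem.List.pyRange 0 (Ton0.length : Int) 1).foldl
    (fun Ton t =>
      if PySem.List.pyGetD row t 0 = 1 then
        if t = 0 then PySem.List.pySetD Ton t (account + 1)
        else PySem.List.pySetD Ton t (PySem.List.pyGetD Ton (t - 1) 0 + 1)
      else Ton)
    Ton0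

-- ===== PORT B =====
-- Stage 1: compress `row` into maximal runs [(value, length)], mutating the last run in place.
-- Stage 2: expand each run; leading 1-run is seeded with `account`, later 1-runs with 0.
def time_on_row_alt (row : List Int) (account : Int) : List Int :=
  let runs : List (Int × Int) := row.foldl
    (fun rs x =>
      match rs.getLast? with
      | some (v, n) => if v = x then rs.dropLast ++ [(v, n + 1)] else rs ++ [(x, 1)]
      | none => rs ++ [(x, 1)])
    []
  (runs.foldl
    (fun (s : List Int × Bool) vn =>
      if vn.1 = 1 then
        let base : Int := if s.2 then account else 0
        (s.1 ++ (PySem.List.pyRange 1 (vn.2 + 1) 1).map (fun k => base + k), false)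
      else (s.1 ++ List.replicate vn.2.toNat 0, false))
    ([], true)).1

-- ===== PRECONDITION & SPEC =====
def Spec_time_on_row (row : List Int) (account : Int) (out : List Int) : Prop := out = time_on_row_alt row account
instance (row : List Int) (account : Int) (out : List Int) : Decidable (Spec_time_on_row row account out) := by unfold Spec_time_on_row; infer_instance

-- ===== CLAIM (what is proved, stated in full; the proofs are below) =====
def Claim_equal_time_on_row : Prop := ∀ (row : List Int) (account : Int), Dom_time_on_row row account → Spec_time_on_row row account (time_on_row row account)

-- ===== LEMMAS AND PROOFS =====

/-- Common characterisation: the run-counting scan both programs compute. -/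
def specRun : List Int → Int → List Int
  | [], _ => []
  | x :: xs, c => if x = 1 then (c + 1) :: specRun xs (c + 1) else 0 :: specRun xs 0

/- ---------- A-side: A equals specRun ---------- -/

lemma loopA (account : Int) : ∀ (rest front pre : List Int) (c : Int),
    pre.length = front.length →
    (front = [] → c = account) →
    (∀ h : pre ≠ [], pre.getLast h = c) →
    ((PySem.List.pyRange (front.length : Int) ((front.length + rest.length : Nat) : Int) 1).foldl
      (fun Ton t =>
        if PySem.List.pyGetD (front ++ rest) t 0 = 1 then
          if t = 0 then PySem.List.pySetD Ton t (account + 1)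
          else PySem.List.pySetD Ton t (PySem.List.pyGetD Ton (t - 1) 0 + 1)
        else Ton)
      (pre ++ List.replicate rest.length 0))
    = pre ++ specRun rest c := by
  intro rest
  induction rest with
  | nil =>
    intro front pre c hlen h0 hlast
    rw [PySem.List.pyRange_one_eq_nil (by simp)]
    simp [specRun]
  | cons x xs ih =>
    intro front pre c hlen h0 hlast
    rw [PySem.List.pyRange_one_cons (by push_cast [List.length_cons]; omega)]
    rw [List.foldl_cons]
    have hget : PySem.List.pyGetD (front ++ x :: xs) (front.length : Int) 0 = x := by
      rw [PySem.List.pyGetD_natCast,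
        List.getD_append_right front (x :: xs) 0 front.length (le_refl _)]
      simp [List.getD]
    by_cases hx : x = 1
    · -- row[t] == 1
      have hval : (if (front.length : Int) = 0 then
            PySem.List.pySetD (pre ++ List.replicate (x :: xs).length 0) (front.length : Int) (account + 1)
          else
            PySem.List.pySetD (pre ++ List.replicate (x :: xs).length 0) (front.length : Int)
              (PySem.List.pyGetD (pre ++ List.replicate (x :: xs).length 0) ((front.length : Int) - 1) 0 + 1))
          = (pre ++ [c + 1]) ++ List.replicate xs.length 0 := by
        by_cases ht : front.length = 0
        · -- leading position: uses account
          have hf : front = [] := List.eq_nil_of_length_eq_zero ht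
          have hp : pre = [] := List.eq_nil_of_length_eq_zero (by omega)
          have hc : c = account := h0 hf
          simp [ht, hp, hc, List.replicate_succ, PySem.List.pySetD]
          simp [PySem.List.pySet?, PySem.List.pyIdx?]
        · have hpos : 0 < pre.length := by omega
          have hpne : pre ≠ [] := by
            intro h; rw [h] at hpos; simp at hpos
          have ht' : ((front.length : Int)) ≠ 0 := by exact_mod_cast ht
          rw [if_neg ht']
          have hcast : (front.length : Int) - 1 = ((pre.length - 1 : Nat) : Int) := by
            push_cast [hlen]; omega
          have hread : PySem.List.pyGetD (pre ++ List.replicate (x :: xs).length 0)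
              ((front.length : Int) - 1) 0 = c := by
            rw [hcast, PySem.List.pyGetD_natCast]
            rw [List.getD_append pre _ 0 _ (by omega)]
            rw [List.getD_eq_getElem _ _ (by omega)]
            rw [← List.getLast_eq_getElem hpne]
            exact hlast hpne
          rw [hread, ← hlen]
          rw [PySem.List.pySetD_natCast]
          simp only [List.length_cons, List.replicate_succ]
          simp
      rw [hget, if_pos hx, hval]
      have hre : ((front.length : Int) + 1) = (((front ++ [x]).length : Nat) : Int) := by
        push_cast [List.length_append, List.length_cons, List.length_nil]; ring
      have happ : front ++ x :: xs = (front ++ [x]) ++ xs := by simp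
      have hend : ((front.length + (x :: xs).length : Nat) : Int)
          = (((front ++ [x]).length + xs.length : Nat) : Int) := by
        push_cast [List.length_append, List.length_cons, List.length_nil]; ring
      rw [hre, hend, happ]
      rw [ih (front ++ [x]) (pre ++ [c + 1]) (c + 1)
        (by simp [hlen]) (by simp) (by intro h; simp)]
      simp [specRun, hx]
    · -- row[t] != 1 : Ton unchanged
      rw [hget, if_neg hx]
      have hre : ((front.length : Int) + 1) = (((front ++ [x]).length : Nat) : Int) := by
        push_cast [List.length_append, List.length_cons, List.length_nil]; ring
      have happ : front ++ x :: xs = (front ++ [x]) ++ xs := by simp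
      have hend : ((front.length + (x :: xs).length : Nat) : Int)
          = (((front ++ [x]).length + xs.length : Nat) : Int) := by
        push_cast [List.length_append, List.length_cons, List.length_nil]; ring
      have hinit : pre ++ List.replicate (x :: xs).length 0
          = (pre ++ [(0 : Int)]) ++ List.replicate xs.length 0 := by
        simp [List.replicate_succ]
      rw [hre, hend, happ, hinit]
      rw [ih (front ++ [x]) (pre ++ [0]) 0
        (by simp [hlen]) (by simp) (by intro h; simp)]
      simp [specRun, hx]

lemma a_eq_specRun (row : List Int) (account : Int) :
    time_on_row row account = specRun row account := by
  unfold time_on_row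
  have hT0 : (PySem.List.pyRange 0 (row.length : Int) 1).map (fun _ => (0 : Int))
      = List.replicate row.length 0 := by
    rw [PySem.List.pyRange_one]
    simp [List.eq_replicate_iff]
  rw [hT0]
  have := loopA account row [] [] account rfl (fun _ => rfl) (by intro h; simp at h)
  simpa using this

/- ---------- B-side: B equals specRun ---------- -/

/-- Run compression, written with the current run at the front (proof-side mirror of B's stage 1). -/
def runsAux : List Int → Int → Int → List (Int × Int)
  | [], v, n => [(v, n)]
  | x :: xs, v, n => if x = v then runsAux xs v (n + 1) else (v, n) :: runsAux xs x 1

/-- What one run expands to, given the seed `b` for a 1-run. -/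
def emitRun (v n b : Int) : List Int :=
  if v = 1 then (PySem.List.pyRange 1 (n + 1) 1).map (fun k => b + k)
  else List.replicate n.toNat 0

/-- Expansion of a run list: the first run is seeded with `b`, later runs with 0. -/
def expandFrom : List (Int × Int) → Int → List Int
  | [], _ => []
  | (v, n) :: rest, b => emitRun v n b ++ expandFrom rest 0

lemma fold_build : ∀ (xs : List Int) (rs : List (Int × Int)) (v n : Int),
    xs.foldl
      (fun rs x =>
        match rs.getLast? with
        | some (v, n) => if v = x then rs.dropLast ++ [(v, n + 1)] else rs ++ [(x, 1)]
        | none => rs ++ [(x, 1)])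
      (rs ++ [(v, n)])
    = rs ++ runsAux xs v n := by
  intro xs
  induction xs with
  | nil => intro rs v n; simp [runsAux]
  | cons x xs ih =>
    intro rs v n
    have hlast : (rs ++ [(v, n)]).getLast? = some (v, n) := by simp
    simp only [List.foldl_cons, hlast]
    by_cases hx : x = v
    · rw [if_pos hx.symm, List.dropLast_concat, ih rs v (n + 1), runsAux, if_pos hx]
    · rw [if_neg (fun h => hx h.symm), ih (rs ++ [(v, n)]) x 1, runsAux, if_neg hx]
      simp

lemma expand_fold (account : Int) : ∀ (rs : List (Int × Int)) (acc : List Int) (lead : Bool),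
    (rs.foldl
      (fun (s : List Int × Bool) vn =>
        if vn.1 = 1 then
          let base : Int := if s.2 then account else 0
          (s.1 ++ (PySem.List.pyRange 1 (vn.2 + 1) 1).map (fun k => base + k), false)
        else (s.1 ++ List.replicate vn.2.toNat 0, false))
      (acc, lead)).1
    = acc ++ expandFrom rs (if lead then account else 0) := by
  intro rs
  induction rs with
  | nil => intro acc lead; simp [expandFrom]
  | cons vn rest ih =>
    intro acc lead
    obtain ⟨v, n⟩ := vn
    rw [List.foldl_cons]
    by_cases hv : v = 1
    · simp only [hv]
      rw [ih]
      simp [expandFrom, emitRun]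
    · simp only [if_neg hv]
      rw [ih]
      simp [expandFrom, emitRun, hv]

lemma emitRun_one_succ (n b : Int) (hn : 0 ≤ n) :
    emitRun 1 (n + 1) b = emitRun 1 n b ++ [b + (n + 1)] := by
  unfold emitRun
  rw [if_pos rfl, if_pos rfl]
  rw [PySem.List.pyRange_one_succ_right (show (1 : Int) ≤ n + 1 by omega)]
  simp

lemma expand_runsAux : ∀ (xs : List Int) (v n b : Int), 1 ≤ n →
    expandFrom (runsAux xs v n) b
      = emitRun v n b ++ specRun xs (if v = 1 then b + n else 0) := by
  intro xs
  induction xs with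
  | nil => intro v n b _; simp [runsAux, expandFrom, specRun]
  | cons x xs ih =>
    intro v n b hn
    by_cases hx : x = v
    · rw [runsAux, if_pos hx]
      rw [ih v (n + 1) b (by omega)]
      by_cases hv : v = 1
      · subst hv
        rw [emitRun_one_succ n b (by omega)]
        simp [specRun, hx]
        ring_nf
        try simp
      · have hx1 : ¬ x = 1 := by rw [hx]; exact hv
        rw [if_neg hv, if_neg hv]
        have : emitRun v (n + 1) b = emitRun v n b ++ [0] := by
          unfold emitRun
          rw [if_neg hv, if_neg hv]
          have : (n + 1).toNat = n.toNat + 1 := by omega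
          rw [this, List.replicate_succ']
        rw [this]
        simp [specRun, hx1]
    · rw [runsAux, if_neg hx]
      rw [expandFrom, ih x 1 0 (by omega)]
      have hp : PySem.List.pyRange 1 2 1 = [1] := by decide
      by_cases hx1 : x = 1
      · have hv1 : ¬ v = 1 := by intro h; exact hx (by rw [hx1, h])
        simp [specRun, hx1, hv1, emitRun, hp]
      · simp [specRun, hx1, emitRun]

lemma alt_eq_specRun (row : List Int) (account : Int) :
    time_on_row_alt row account = specRun row account := by
  cases row with
  | nil => simp [time_on_row_alt, specRun]
  | cons x xs =>
    unfold time_on_row_alt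
    rw [List.foldl_cons]
    have h1 : (List.getLast? ([] : List (Int × Int))) = none := rfl
    simp only [h1]
    rw [show ([] : List (Int × Int)) ++ [(x, 1)] = [] ++ [(x, (1 : Int))] from rfl]
    rw [fold_build xs [] x 1, List.nil_append]
    rw [expand_fold account (runsAux xs x 1) [] true, List.nil_append]
    rw [if_pos rfl]
    rw [expand_runsAux xs x 1 account le_rfl]
    have hp : PySem.List.pyRange 1 2 1 = [1] := by decide
    by_cases hx : x = 1
    · simp [specRun, hx, emitRun, hp]
    · simp [specRun, hx, emitRun]

-- ===== VERDICT (by name: the statement is the Claim_ definition above) =====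
theorem time_on_row_spec : Claim_equal_time_on_row := by
  intro row account _
  unfold Spec_time_on_row
  rw [a_eq_specRun, alt_eq_specRun]
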